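-- pv_equiv track=rewrite | github.com/cuponomia/dojo | greed-2021-09-10/application.py | isXOfKind
-- ===== SOURCE A (Python) =====
-- def isXOfKind(array):
-- 	count_map = {}
--
-- 	for number in array:
-- 		count_map[number] = count_map.get(number, 0) + 1
--
-- 	for number, count in count_map.items():
-- 		if count >= 3:
-- 			remaining_array = [x for x in array if x != number]
--
-- 			if number == 1:
-- 				return 500 * (2 ** (count - 2)), remaining_array
--
-- 			return number * 50 * (2 ** (count - 2)), remaining_array
--
-- 	return 0, array
-- ===== SOURCE B (Python) =====
-- def isXOfKind(array):
-- 	s = sorted(array)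
-- 	triples = {}
-- 	i = 0
-- 	while i < len(s):
-- 		j = i
-- 		while j < len(s) and s[j] == s[i]:
-- 			j += 1
-- 		if j - i >= 3:
-- 			triples[s[i]] = j - i
-- 		i = j
-- 	for number in array:
-- 		if number in triples:
-- 			count = triples[number]
-- 			remaining = [x for x in array if x != number]
-- 			if number == 1:
-- 				return 500 * (2 ** (count - 2)), remaining
-- 			return number * 50 * (2 ** (count - 2)), remaining
-- 	return 0, array
-- ===== Notes on version B (the rewrite author's own statement) =====
-- stated objective: alternative
-- what changed: B counts occurrences by sorting a copy of the array and run-length-encoding the sorted list (two nested index loops) to collect the values occurring >= 3 times, then scans the original array for the first such value; A instead hash-counts into a dict in one pass and scans the dict's items.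
import Mathlib
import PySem

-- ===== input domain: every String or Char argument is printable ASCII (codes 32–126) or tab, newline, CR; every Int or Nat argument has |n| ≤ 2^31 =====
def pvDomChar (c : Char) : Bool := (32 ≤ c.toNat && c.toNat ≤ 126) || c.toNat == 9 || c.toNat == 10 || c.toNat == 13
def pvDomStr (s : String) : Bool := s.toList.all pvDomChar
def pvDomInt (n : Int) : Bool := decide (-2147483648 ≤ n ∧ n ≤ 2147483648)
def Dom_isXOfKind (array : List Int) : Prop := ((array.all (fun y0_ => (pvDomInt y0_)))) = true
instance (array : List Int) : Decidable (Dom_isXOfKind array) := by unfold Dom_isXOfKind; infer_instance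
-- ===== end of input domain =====

-- B counts by sorting a copy and run-length-encoding the sorted list to collect the values
-- occurring >= 3 times, then scans the original array for the first such value; A hash-counts
-- into a dict and scans the dict's items (objective: alternative algorithm, same cost class).

-- ===== PORT A =====
-- A's second loop: scan count_map.items for the first (number, count) with count >= 3.
def pvScanItemsA (array : List Int) : List (Int × Int) → Int × List Int
  | [] => (0, array)
  | (number, count) :: rest =>
    if 3 ≤ count then
      let remaining_array := array.filter (fun x => x != number)
      if number = 1 then (500 * 2 ^ (count - 2).toNat, remaining_array)
      else (number * 50 * 2 ^ (count - 2).toNat, remaining_array)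
    else pvScanItemsA array rest

def isXOfKind (array : List Int) : Int × List Int :=
  let count_map := array.foldl (fun d x => d.insert x (d.getD x 0 + 1)) PySem.Dict.empty
  pvScanItemsA array count_map.items

-- ===== PORT B =====
-- B's nested while loops over the sorted copy s: the outer loop advances i run by run,
-- the inner loop (here takeWhile/dropWhile on the remaining suffix) finds the run's end j;
-- runs of length >= 3 are recorded in triples.
def pvRunsB (d : PySem.Dict Int Int) : List Int → PySem.Dict Int Int
  | [] => d
  | v :: rest =>
    let run : Int := 1 + (rest.takeWhile (fun x => x == v)).length
    pvRunsB (if 3 ≤ run then d.insert v run else d) (rest.dropWhile (fun x => x == v))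
termination_by l => l.length
decreasing_by
  have := List.length_dropWhile_le (fun x => x == v) rest
  simp only [List.length_cons]
  omega

-- B's for loop: first element of array that is a key of triples.
def pvScanB (array : List Int) (d : PySem.Dict Int Int) : List Int → Int × List Int
  | [] => (0, array)
  | number :: rest =>
    if d.contains number then
      let count := d.getD number 0
      let remaining := array.filter (fun x => x != number)
      if number = 1 then (500 * 2 ^ (count - 2).toNat, remaining)
      else (number * 50 * 2 ^ (count - 2).toNat, remaining)
    else pvScanB array d rest

def isXOfKind_alt (array : List Int) : Int × List Int :=
  let s := PySem.List.sorted array (fun x => x) false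
  pvScanB array (pvRunsB PySem.Dict.empty s) array

-- ===== PRECONDITION & SPEC =====
def Spec_isXOfKind (array : List Int) (out : Int × List Int) : Prop := out = isXOfKind_alt array
instance (array : List Int) (out : Int × List Int) : Decidable (Spec_isXOfKind array out) := by unfold Spec_isXOfKind; infer_instance

-- ===== CLAIM (what is proved, stated in full; the proofs are below) =====
def Claim_equal_isXOfKind : Prop := ∀ (array : List Int), Dom_isXOfKind array → Spec_isXOfKind array (isXOfKind array)

-- ===== LEMMAS AND PROOFS =====

-- the common shape of both programs: the result is determined by the first value with count ≥ 3
def pvOut (array : List Int) : Option Int → Int × List Int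
  | none => (0, array)
  | some number =>
    let count : Int := List.count number array
    let remaining := array.filter (fun x => x != number)
    if number = 1 then (500 * 2 ^ (count - 2).toNat, remaining)
    else (number * 50 * 2 ^ (count - 2).toNat, remaining)

def pvP (array : List Int) (k : Int) : Bool := 3 ≤ (List.count k array : Int)

-- ---- A side ----
theorem pvScanItemsA_eq (array l : List Int) :
    pvScanItemsA array (l.map (fun k => (k, (List.count k array : Int)))) =
      pvOut array (l.find? (pvP array)) := by
  induction l with
  | nil => rfl
  | cons n rest ih =>
    simp only [List.map, pvScanItemsA, List.find?]
    by_cases h : (3 : Int) ≤ List.count n array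
    · simp [pvP, h, pvOut]
    · simp [pvP, h, ih]

-- the Set.add fold only appends to its accumulator
theorem pvFold_add_append (l acc : List Int) :
    ∃ t, l.foldl PySem.Set.add acc = acc ++ t := by
  induction l generalizing acc with
  | nil => exact ⟨[], by simp⟩
  | cons x xs ih =>
    simp only [List.foldl]
    by_cases hx : x ∈ acc
    · have h1 : PySem.Set.add acc x = acc := by
        simp [PySem.Set.add, PySem.Set.contains, hx]
      rw [h1]; exact ih acc
    · have h1 : PySem.Set.add acc x = acc ++ [x] := by
        simp [PySem.Set.add, PySem.Set.contains, hx]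
      rw [h1]
      obtain ⟨t, ht⟩ := ih (acc ++ [x])
      exact ⟨[x] ++ t, by simp [ht]⟩

-- find? over the dedup fold agrees with find? over the list, while nothing in acc satisfies p
theorem pvFind_foldl_add (p : Int → Bool) (l : List Int) :
    ∀ acc : List Int, (∀ a ∈ acc, p a = false) →
      (l.foldl PySem.Set.add acc).find? p = l.find? p := by
  induction l with
  | nil =>
    intro acc hacc
    have h0 : acc.find? p = none := List.find?_eq_none.mpr (fun a ha => by simp [hacc a ha])
    simpa using h0
  | cons x xs ih =>
    intro acc hacc
    simp only [List.foldl, List.find?]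
    by_cases hp : p x
    · have hx : x ∉ acc := fun hmem => absurd hp (by simp [hacc x hmem])
      have hadd : PySem.Set.add acc x = acc ++ [x] := by
        simp [PySem.Set.add, PySem.Set.contains, hx]
      rw [hadd]
      obtain ⟨t, ht⟩ := pvFold_add_append xs (acc ++ [x])
      have h0 : acc.find? p = none := List.find?_eq_none.mpr (fun a ha => by simp [hacc a ha])
      rw [ht, List.append_assoc, List.find?_append, h0]
      simp [hp]
    · have hadd : ∀ a ∈ PySem.Set.add acc x, p a = false := by
        intro a ha
        simp only [PySem.Set.add] at ha
        split at ha
        · exact hacc a ha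
        · rcases List.mem_append.mp ha with h | h
          · exact hacc a h
          · simp only [List.mem_singleton] at h; subst h
            exact Bool.eq_false_iff.mpr (by simpa using hp)
      simp only [Bool.not_eq_true] at hp
      rw [hp, ih (PySem.Set.add acc x) hadd]

theorem pvFind_ofList (p : Int → Bool) (l : List Int) :
    (PySem.Set.ofList l).find? p = l.find? p := by
  rw [PySem.Set.ofList_eq_foldl]
  exact pvFind_foldl_add p l [] (by simp)

theorem pvA_eq (array : List Int) :
    isXOfKind array = pvOut array (array.find? (pvP array)) := by
  show pvScanItemsA array
      (PySem.Dict.items (array.foldl (fun d x => d.insert x (d.getD x 0 + 1)) PySem.Dict.empty)) =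
    pvOut array (array.find? (pvP array))
  rw [PySem.Dict.foldl_insert_getD_add_one_eq_counter, PySem.Dict.items_counter,
    pvScanItemsA_eq, pvFind_ofList]

-- ---- B side ----
-- run-length pass over a ≤-sorted list: get? reads off exactly the counts ≥ 3
theorem pvRunsB_get? (s : List Int) (d : PySem.Dict Int Int)
    (hs : s.Pairwise (· ≤ ·)) (v : Int) :
    (pvRunsB d s).get? v =
      if v ∈ s ∧ 3 ≤ (List.count v s : Int) then some ((List.count v s : Int)) else d.get? v := by
  induction d, s using pvRunsB.induct with
  | case1 d => simp [pvRunsB]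
  | case2 d v0 rest run ih =>
    set take := rest.takeWhile (fun x => x == v0) with htakedef
    set drop := rest.dropWhile (fun x => x == v0) with hdropdef
    have hrundef : run = 1 + (take.length : Int) := rfl
    simp only [dite_eq_ite] at ih
    have htake : ∀ x ∈ take, x = v0 := by
      intro x hx
      have hmem := List.mem_takeWhile_imp hx
      simpa using hmem
    have hrest_ge : ∀ y ∈ rest, v0 ≤ y := (List.pairwise_cons.mp hs).1
    have hdrop_sub : List.Sublist drop rest := hdropdef ▸ List.dropWhile_sublist _
    have hdrop_pw : List.Pairwise (· ≤ ·) drop :=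
      ((List.pairwise_cons.mp hs).2).sublist hdrop_sub
    have hv0_drop : v0 ∉ drop := by
      intro hmem
      cases hd : drop with
      | nil => rw [hd] at hmem; simp at hmem
      | cons h t =>
        have hhead : ¬ ((fun x => x == v0) h = true) := by
          have hh := List.head?_dropWhile_not (p := fun x => x == v0) (l := rest)
          rw [← hdropdef, hd] at hh
          simpa using hh
        have hne : h ≠ v0 := by simpa using hhead
        have hge : v0 ≤ h := hrest_ge h (hdrop_sub.mem (hd ▸ List.mem_cons_self))
        have hlt : v0 < h := lt_of_le_of_ne hge (Ne.symm hne)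
        rw [hd] at hmem
        rcases List.mem_cons.mp hmem with h1 | h1
        · omega
        · have := (List.pairwise_cons.mp (hd ▸ hdrop_pw)).1 v0 h1
          omega
    have hsplit : v0 :: rest = v0 :: (take ++ drop) := by
      rw [htakedef, hdropdef, List.takeWhile_append_dropWhile]
    have hcount0 : List.count v0 (v0 :: rest) = 1 + take.length := by
      rw [hsplit, List.count_cons_self, List.count_append]
      have h1 : List.count v0 take = take.length :=
        List.count_eq_length.mpr (fun x hx => by rw [htake x hx])
      have h2 : List.count v0 drop = 0 := List.count_eq_zero.mpr hv0_drop
      omega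
    simp only [pvRunsB, ← htakedef, ← hdropdef, ← hrundef]
    rw [ih hdrop_pw]
    by_cases hv : v = v0
    · subst hv
      have hrun : run = (List.count v (v :: rest) : Int) := by
        rw [hrundef, hcount0]; push_cast; ring
      simp only [hv0_drop, false_and, if_false]
      by_cases h3 : (3 : Int) ≤ run
      · have hm : v ∈ v :: rest := List.mem_cons_self
        rw [if_pos h3, PySem.Dict.get?_insert_self, if_pos ⟨hm, by omega⟩, hrun]
      · rw [if_neg h3, if_neg (by rw [← hrun]; tauto)]
    · have hcnt : List.count v (v0 :: rest) = List.count v drop := by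
        rw [hsplit, List.count_cons_of_ne (Ne.symm hv), List.count_append]
        have : List.count v take = 0 :=
          List.count_eq_zero.mpr (fun hm => hv (htake v hm))
        omega
      have hmem : (v ∈ v0 :: rest) ↔ v ∈ drop := by
        constructor
        · intro h
          rw [hsplit] at h
          rcases List.mem_cons.mp h with h2 | h2
          · exact absurd h2 hv
          · rcases List.mem_append.mp h2 with h3 | h3
            · exact absurd (htake v h3) hv
            · exact h3
        · intro h
          exact List.mem_cons_of_mem _ (hdrop_sub.mem h)
      have hd' : (if 3 ≤ run then d.insert v0 run else d).get? v = d.get? v := by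
        split
        · exact PySem.Dict.get?_insert_of_ne _ _ hv
        · rfl
      rw [hd', hcnt]
      by_cases h1 : v ∈ drop ∧ 3 ≤ (List.count v drop : Int)
      · rw [if_pos h1, if_pos ⟨hmem.mpr h1.1, h1.2⟩]
      · rw [if_neg h1, if_neg (by rw [hmem]; exact h1)]

-- B's scan over the array, with a dict answering "count ≥ 3?", is the find?/pvOut shape
theorem pvScanB_eq (array : List Int) (d : PySem.Dict Int Int)
    (hd : ∀ v, d.get? v = if pvP array v then some ((List.count v array : Int)) else none)
    (l : List Int) :
    pvScanB array d l = pvOut array (l.find? (pvP array)) := by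
  induction l with
  | nil => rfl
  | cons n rest ih =>
    simp only [pvScanB, List.find?]
    have hc : d.contains n = pvP array n := by
      rw [PySem.Dict.contains_eq_isSome_get?, hd n]
      by_cases h : pvP array n <;> simp [h]
    by_cases h : pvP array n
    · rw [hc, if_pos h, h]
      have : d.getD n 0 = (List.count n array : Int) := by
        rw [PySem.Dict.getD_eq_get?_getD, hd n, if_pos h]; rfl
      simp only [this, pvOut]
    · rw [hc, if_neg (by simpa using h)]
      simp only [Bool.not_eq_true] at h
      rw [h, ih]

theorem pvB_eq (array : List Int) :
    isXOfKind_alt array = pvOut array (array.find? (pvP array)) := by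
  show pvScanB array (pvRunsB PySem.Dict.empty (PySem.List.sorted array (fun x => x) false)) array
      = pvOut array (array.find? (pvP array))
  set s := PySem.List.sorted array (fun x => x) false with hsdef
  have hperm : s.Perm array := PySem.List.sorted_perm array (fun x => x) false
  have hpw : s.Pairwise (· ≤ ·) := by
    have := PySem.List.sorted_pairwise array (fun x => x)
    simpa using this
  apply pvScanB_eq
  intro v
  rw [pvRunsB_get? s PySem.Dict.empty hpw v]
  have hcnt : List.count v s = List.count v array := hperm.count_eq v
  have hmem : v ∈ s ↔ v ∈ array := hperm.mem_iff
  by_cases h : pvP array v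
  · have h3 : 3 ≤ (List.count v array : Int) := by simpa [pvP] using h
    have hm : v ∈ array := List.count_pos_iff.mp (by omega)
    rw [if_pos ⟨hmem.mpr hm, by rw [hcnt]; exact h3⟩, hcnt, if_pos h]
  · have h3 : ¬ (3 : Int) ≤ List.count v array := by simpa [pvP] using h
    rw [if_neg (by rw [hcnt]; tauto), if_neg (by simpa using h)]
    simp

-- ===== VERDICT (by name: the statement is the Claim_ definition above) =====
theorem isXOfKind_spec : Claim_equal_isXOfKind := by
  intro array _
  show isXOfKind array = isXOfKind_alt array
  rw [pvA_eq, pvB_eq]
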